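-- pv_equiv track=rewrite | github.com/Monem-Adel/Graduation_Project | Parser/Parser.py | find_state
-- ===== SOURCE A (Python) =====
-- def find_state(state , table):
--     # if isinstance(state_, state):
--     i = 1
--     index = -1
--     n = len(table)
--     while i < n :
--         table_content = table[i][0]
--         if table_content == state:
--             index = i
--         i+=1
--     return index
-- ===== SOURCE B (Python) =====
-- def find_state(state, table):
--     return next((i for i in range(len(table) - 1, 0, -1) if table[i][0] == state), -1)
-- ===== Notes on version B (the rewrite author's own statement) =====
-- stated objective: idiomatic
-- what changed: Replaces the forward while-loop that overwrites an accumulator with the last match by a backward scan (range(n-1,0,-1) in a generator with next) that short-circuits on the first match seen, i.e. the last matching index.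
import Mathlib
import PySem

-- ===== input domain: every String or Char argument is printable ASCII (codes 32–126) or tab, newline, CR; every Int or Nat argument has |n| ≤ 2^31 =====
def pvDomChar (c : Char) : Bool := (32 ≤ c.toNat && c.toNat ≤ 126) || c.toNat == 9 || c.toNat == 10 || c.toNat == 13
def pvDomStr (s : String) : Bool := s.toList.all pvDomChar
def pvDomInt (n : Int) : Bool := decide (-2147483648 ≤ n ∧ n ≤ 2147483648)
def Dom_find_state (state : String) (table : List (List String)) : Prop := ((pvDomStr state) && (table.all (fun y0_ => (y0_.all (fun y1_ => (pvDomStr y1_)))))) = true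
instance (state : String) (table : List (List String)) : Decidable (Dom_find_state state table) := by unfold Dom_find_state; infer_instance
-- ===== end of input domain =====

-- B replaces A's forward last-match accumulator loop with a short-circuiting backward scan (idiomatic next/generator form); same O(n) cost.


-- table[i][0], exact for rows in range that are nonempty (Pre_); outside that Python raises IndexError
def pvCell (table : List (List String)) (i : Int) : String :=
  (PySem.List.pyGet? ((PySem.List.pyGet? table i).getD []) 0).getD ""

-- ===== PORT A =====
-- while loop i = 1 .. n-1, remembering the index of the last row whose head equals state
def find_state (state : String) (table : List (List String)) : Int :=
  (PySem.List.pyRange 1 (table.length : Int) 1).foldl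
    (fun index i => if pvCell table i == state then i else index) (-1)

-- ===== PORT B =====
-- first match of the backward generator range(len(table)-1, 0, -1), default -1 (Source B's next(...))
def pvScanRev (state : String) (table : List (List String)) : List Int → Int
  | [] => -1
  | i :: rest => if pvCell table i == state then i else pvScanRev state table rest

def find_state_alt (state : String) (table : List (List String)) : Int :=
  pvScanRev state table (PySem.List.pyRange ((table.length : Int) - 1) 0 (-1))

-- ===== PRECONDITION & SPEC =====
-- Python A (and B) raise IndexError on table[i][0] when a row past index 0 is empty; Pre_ excludes exactly those inputs.
def Pre_find_state (state : String) (table : List (List String)) : Prop :=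
  ∀ row ∈ table.tail, row ≠ []
instance (state : String) (table : List (List String)) : Decidable (Pre_find_state state table) := by unfold Pre_find_state; infer_instance
def pvWitness_find_state : String × List (List String) := ("x", [["h"], ["x"], ["y"], ["x"]])

def Spec_find_state (state : String) (table : List (List String)) (out : Int) : Prop := out = find_state_alt state table
instance (state : String) (table : List (List String)) (out : Int) : Decidable (Spec_find_state state table out) := by unfold Spec_find_state; infer_instance

-- ===== CLAIM (what is proved, stated in full; the proofs are below) =====
def Claim_equal_find_state : Prop := ∀ (state : String) (table : List (List String)), Dom_find_state state table → Pre_find_state state table → Spec_find_state state table (find_state state table)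

-- ===== LEMMAS AND PROOFS =====

-- the last-match foldl equals the first match of the reversed list
theorem pv_foldl_last_eq_rev_find (P : Int → Bool) :
    ∀ (l : List Int) (a : Int),
      l.foldl (fun acc i => if P i then i else acc) a = (l.reverse.find? P).getD a := by
  intro l
  induction l with
  | nil => intro a; simp
  | cons x l ih =>
      intro a
      simp only [List.foldl_cons, List.reverse_cons, List.find?_append]
      rw [ih]
      cases h : l.reverse.find? P with
      | some y => simp
      | none => cases hP : P x <;> simp [List.find?, hP]

theorem pvScanRev_eq_find (state : String) (table : List (List String)) :
    ∀ (l : List Int),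
      pvScanRev state table l = (l.find? (fun i => pvCell table i == state)).getD (-1) := by
  intro l
  induction l with
  | nil => simp [pvScanRev]
  | cons x l ih =>
      by_cases h : pvCell table x == state
      · simp [pvScanRev, h, List.find?]
      · simp [pvScanRev, List.find?, h, ih]

-- ===== VERDICT (by name: the statement is the Claim_ definition above) =====
theorem find_state_spec : Claim_equal_find_state := by
  intro state table _ _
  unfold Spec_find_state find_state find_state_alt
  rw [pv_foldl_last_eq_rev_find, pvScanRev_eq_find]
  have h : PySem.List.pyRange ((table.length : Int) - 1) 0 (-1)
      = (PySem.List.pyRange 1 (table.length : Int) 1).reverse := by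
    rw [PySem.List.pyRange_neg_one_eq_reverse]
    norm_num
  rw [h]
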